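-- pv_equiv track=rewrite | github.com/AP-MI-2021/lab-3-AnamariaCiocan | main.py | get_longest_all_palindromes
-- ===== SOURCE A (Python) =====
-- def is_palindrome(n):
--     '''
--     Verifica daca un numar este palindrom.
--     param: n-numar intreg
--     return: True/False daca indeplineste sau nu conditia de a fi palindrom.
--     '''
--     x=0
--     k=0
--     cn=n
--     while n>0:
--         k=n%10
--         x=x*10+k
--         n=n//10
--     if cn==x:
--         return True
--     else:
--         return False
--
-- def get_longest_all_palindromes(lst: list[int]) -> list[int]:
--     '''
--     Determina cea mai lunga subsecventa in care toate numerele sunt palindroame.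
--     param: list-lista de numere
--     return: o lista cu subsecventa ceruta
--     '''
--     n=len(lst)
--     result=[]
--     for i in range (n):
--         for j in range (i,n):
--             all_palindrome=True
--             for num in lst[i:j+1]:
--                 if is_palindrome(num)==0:
--                     all_palindrome=False
--                     break
--             if all_palindrome:
--                 if j-i+1>len(result):
--                     result = lst[i:j+1]
--     return result
-- ===== SOURCE B (Python) =====
-- def is_palindrome(n):
--     x = 0
--     k = 0
--     cn = n
--     while n > 0:
--         k = n % 10
--         x = x * 10 + k
--         n = n // 10
--     return cn == x
--
-- def get_longest_all_palindromes(lst: list[int]) -> list[int]: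
--     '''Single left-to-right pass: keep the current run of palindromes and
--     record it whenever it becomes strictly longer than the best run so far
--     (so the first maximal run is kept, as in A).'''
--     best = []
--     cur = []
--     for num in lst:
--         if is_palindrome(num):
--             cur = cur + [num]
--             if len(cur) > len(best):
--                 best = cur
--         else:
--             cur = []
--     return best
-- ===== Notes on version B (the rewrite author's own statement) =====
-- stated objective: faster
-- what changed: A enumerates all O(n^2) windows and re-tests each slice for all-palindromes (O(n^3) digit checks plus slice copies); B makes one left-to-right pass keeping the current run of palindromes and recording it when it first becomes strictly longer than the best, so each element's palindromicity is tested once.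
import Mathlib
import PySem

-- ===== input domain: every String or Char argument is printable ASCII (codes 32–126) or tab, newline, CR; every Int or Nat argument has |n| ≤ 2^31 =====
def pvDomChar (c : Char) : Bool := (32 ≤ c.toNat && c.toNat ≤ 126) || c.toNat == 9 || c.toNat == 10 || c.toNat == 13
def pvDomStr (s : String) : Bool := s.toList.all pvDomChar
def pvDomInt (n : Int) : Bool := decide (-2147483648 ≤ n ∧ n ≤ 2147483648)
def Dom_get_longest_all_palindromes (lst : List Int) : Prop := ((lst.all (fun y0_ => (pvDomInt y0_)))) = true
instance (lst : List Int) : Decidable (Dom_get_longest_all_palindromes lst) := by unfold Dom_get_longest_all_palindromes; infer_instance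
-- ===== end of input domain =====

-- B replaces A's scan over all (i, j) windows by one left-to-right pass that keeps the
-- current palindrome run and records it when it beats the best run so far.

-- ===== PORT A =====
-- is_palindrome: the while-loop reversing the decimal digits, as a recursion on n.
def palRev (n x : Int) : Int :=
  if h : n > 0 then palRev (PySem.Int.floordiv n 10) (x * 10 + PySem.Int.mod n 10) else x
termination_by n.toNat
decreasing_by
  rw [PySem.Int.floordiv_eq_ediv_of_pos (by norm_num : (0:Int) < 10)]
  have := Int.mul_ediv_add_emod n 10
  have := Int.emod_nonneg n (by norm_num : (10:Int) ≠ 0)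
  have := Int.emod_lt_of_pos n (by norm_num : (0:Int) < 10)
  omega

def pal (n : Int) : Bool := decide (n = palRev n 0)

-- A: for i in range(n): for j in range(i, n): …; the inner for/break loop computing
-- all_palindrome over lst[i:j+1] is exactly List.all of the slice.
def get_longest_all_palindromes (lst : List Int) : List Int :=
  let n : Int := lst.length
  (PySem.List.pyRange 0 n 1).foldl (fun result i =>
    (PySem.List.pyRange i n 1).foldl (fun result j =>
      let all_palindrome : Bool := (PySem.List.slice lst (some i) (some (j+1))).all (fun num => pal num)
      if all_palindrome then
        (if j - i + 1 > PySem.List.len result then PySem.List.slice lst (some i) (some (j+1)) else result)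
      else result) result) []

-- ===== PORT B =====
-- state = (best, cur): best run recorded so far, current run of palindromes.
def bstep (st : List Int × List Int) (num : Int) : List Int × List Int :=
  if pal num then
    let cur := st.2 ++ [num]
    if cur.length > st.1.length then (cur, cur) else (st.1, cur)
  else (st.1, ([] : List Int))

def get_longest_all_palindromes_alt (lst : List Int) : List Int :=
  (lst.foldl bstep (([] : List Int), ([] : List Int))).1

-- ===== PRECONDITION & SPEC =====
def Spec_get_longest_all_palindromes (lst : List Int) (out : List Int) : Prop := out = get_longest_all_palindromes_alt lst
instance (lst : List Int) (out : List Int) : Decidable (Spec_get_longest_all_palindromes lst out) := by unfold Spec_get_longest_all_palindromes; infer_instance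

-- ===== CLAIM (what is proved, stated in full; the proofs are below) =====
def Claim_equal_get_longest_all_palindromes : Prop := ∀ (lst : List Int), Dom_get_longest_all_palindromes lst → Spec_get_longest_all_palindromes lst (get_longest_all_palindromes lst)

-- ===== LEMMAS AND PROOFS =====

-- length of the initial palindrome run
def runp : List Int → Nat
  | [] => 0
  | a :: t => if pal a then runp t + 1 else 0

-- maximal palindrome-run length over all suffixes
def maxr : List Int → Nat
  | [] => 0
  | a :: t => max (runp (a :: t)) (maxr t)

-- the first maximal palindrome run
def fmr : List Int → List Int
  | [] => []
  | a :: t => if runp (a :: t) ≥ maxr t then (a :: t).take (runp (a :: t)) else fmr t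

theorem runp_le (l : List Int) : runp l ≤ l.length := by
  induction l with
  | nil => simp [runp]
  | cons a t ih => simp only [runp, List.length_cons]; split <;> omega

theorem maxr_ge_runp (l : List Int) : runp l ≤ maxr l := by
  cases l with
  | nil => simp [runp, maxr]
  | cons a t => simp only [maxr]; exact Nat.le_max_left _ _

theorem len_fmr (l : List Int) : (fmr l).length = maxr l := by
  induction l with
  | nil => simp [fmr, maxr]
  | cons a t ih =>
    have hr := runp_le (a :: t)
    simp only [fmr, maxr]
    split
    · simp only [List.length_take, List.length_cons] at *
      omega
    · omega

theorem runp_all {l : List Int} (h : l.all pal = true) : runp l = l.length := by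
  induction l with
  | nil => simp [runp]
  | cons a t ih =>
    simp only [List.all_cons, Bool.and_eq_true] at h
    simp [runp, h.1, ih h.2]

theorem maxr_all {l : List Int} (h : l.all pal = true) : maxr l = l.length := by
  induction l with
  | nil => simp [maxr]
  | cons a t ih =>
    have h' := h
    simp only [List.all_cons, Bool.and_eq_true] at h'
    simp only [maxr, runp_all h, ih h'.2, List.length_cons]
    omega

theorem fmr_all {l : List Int} (h : l.all pal = true) : fmr l = l := by
  cases l with
  | nil => simp [fmr]
  | cons a t =>
    have h' := h
    simp only [List.all_cons, Bool.and_eq_true] at h'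
    simp only [fmr, runp_all h, maxr_all h'.2, List.length_cons]
    rw [if_pos (by omega)]
    exact List.take_of_length_le (by simp)

theorem fmr_nil_of_maxr_zero {l : List Int} (h : maxr l = 0) : fmr l = [] := by
  induction l with
  | nil => simp [fmr]
  | cons a t ih =>
    simp only [maxr, Nat.max_eq_zero_iff] at h
    simp [fmr, h.1, h.2]

theorem fmr_eq_take_of_runp_eq_maxr {l : List Int} (h : runp l = maxr l) :
    fmr l = l.take (runp l) := by
  cases l with
  | nil => simp [fmr]
  | cons a t =>
    simp only [maxr] at h
    have : maxr t ≤ runp (a :: t) := by omega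
    simp only [fmr, if_pos this]

theorem all_take_iff {l : List Int} {m : Nat} (hm : m ≤ l.length) :
    ((l.take m).all pal = true) ↔ m ≤ runp l := by
  induction l generalizing m with
  | nil => simp at hm; simp [hm]
  | cons a t ih =>
    cases m with
    | zero => simp
    | succ m' =>
      simp only [List.take_succ_cons, List.all_cons, Bool.and_eq_true, runp]
      simp only [List.length_cons] at hm
      by_cases hp : pal a = true
      · simp only [hp, if_true, true_and]
        rw [ih (by omega)]
        omega
      · simp [hp]

-- A's outer loop as a recursion over suffixes
def afold (r : List Int) : List Int → List Int
  | [] => r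
  | a :: t => afold (if runp (a :: t) > r.length then (a :: t).take (runp (a :: t)) else r) t

theorem afold_eq (l : List Int) : ∀ r, afold r l = if maxr l > r.length then fmr l else r := by
  induction l with
  | nil => intro r; simp [afold, maxr]
  | cons a t ih =>
    intro r
    have hrun := runp_le (a :: t)
    have hlf := len_fmr t
    simp only [List.length_cons] at hrun
    have htake : ((a :: t).take (runp (a :: t))).length = runp (a :: t) := by
      simp only [List.length_take, List.length_cons]; omega
    simp only [afold, ih]
    simp only [maxr, fmr]
    split_ifs <;> first | rfl | omega

-- A's inner loop (for j in range(i, n)) over s = lst.drop i, in Nat form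
theorem inner_eq (s : List Int) (K : Nat) (hK : K ≤ s.length) (r : List Int) :
    (List.range K).foldl (fun r d =>
      if (s.take (d + 1)).all pal = true then
        (if d + 1 > r.length then s.take (d + 1) else r) else r) r
    = if min (runp s) K > r.length then s.take (min (runp s) K) else r := by
  induction K generalizing r with
  | zero => simp
  | succ K ih =>
    rw [List.range_succ, List.foldl_append, ih (by omega)]
    simp only [List.foldl_cons, List.foldl_nil]
    by_cases hall : (s.take (K + 1)).all pal = true
    · have hR : K + 1 ≤ runp s := (all_take_iff hK).mp hall
      have hmin1 : min (runp s) (K + 1) = K + 1 := by omega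
      have hmin2 : min (runp s) K = K := by omega
      rw [if_pos hall, hmin1, hmin2]
      have hlK : (s.take K).length = K := by
        simp only [List.length_take]; omega
      split_ifs <;> first | rfl | omega
    · rw [if_neg hall]
      have hR : runp s ≤ K := by
        by_contra hc
        exact hall ((all_take_iff hK).mpr (by omega))
      rw [show min (runp s) (K + 1) = min (runp s) K from by omega]

theorem fold_drop (l : List Int) : ∀ r, (List.range l.length).foldl
    (fun r i => if runp (l.drop i) > r.length then (l.drop i).take (runp (l.drop i)) else r) r
    = afold r l := by
  induction l with
  | nil => intro r; simp [afold]
  | cons a t ih =>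
    intro r
    rw [List.length_cons, List.range_succ_eq_map, List.foldl_cons, List.foldl_map]
    simp only [List.drop_zero, List.drop_succ_cons, afold]
    exact ih _

theorem portA_eq_afold (lst : List Int) : get_longest_all_palindromes lst = afold [] lst := by
  have step1 : get_longest_all_palindromes lst =
      (List.range lst.length).foldl (fun r i =>
        (List.range (lst.length - i)).foldl (fun r d =>
          if ((lst.drop i).take (d + 1)).all pal = true then
            (if d + 1 > r.length then (lst.drop i).take (d + 1) else r) else r) r) [] := by
    unfold get_longest_all_palindromes
    simp only [PySem.List.pyRange_one, Int.sub_zero, Int.toNat_natCast, List.foldl_map, zero_add]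
    congr 1
    funext r i
    congr 1
    funext r' d
    have hsl : PySem.List.slice lst (some (i : Int)) (some ((i : Int) + (d : Int) + 1))
        = (lst.drop i).take (d + 1) := by
      rw [show (i : Int) + (d : Int) + 1 = ((i + (d + 1) : Nat) : Int) from by push_cast; ring,
        PySem.List.slice_natCast]
      congr 1
      omega
    simp only [hsl, PySem.List.len_eq]
    have hc : ((i : Int) + (d : Int) - (i : Int) + 1 > ((r'.length : Nat) : Int))
        ↔ (d + 1 > r'.length) := by omega
    rw [if_congr Iff.rfl (if_congr hc rfl rfl) rfl]
    congr 1
    omega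
  rw [step1]
  have step2 : ∀ (r : List Int) (i : Nat),
      (List.range (lst.length - i)).foldl (fun r d =>
        if ((lst.drop i).take (d + 1)).all pal = true then
          (if d + 1 > r.length then (lst.drop i).take (d + 1) else r) else r) r
      = if runp (lst.drop i) > r.length then (lst.drop i).take (runp (lst.drop i)) else r := by
    intro r i
    have hle := runp_le (lst.drop i)
    rw [inner_eq (lst.drop i) (lst.length - i) (by simp) r,
      show min (runp (lst.drop i)) (lst.length - i) = runp (lst.drop i) from by
        simp only [List.length_drop] at hle; omega]
  calc (List.range lst.length).foldl (fun r i =>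
        (List.range (lst.length - i)).foldl (fun r d =>
          if ((lst.drop i).take (d + 1)).all pal = true then
            (if d + 1 > r.length then (lst.drop i).take (d + 1) else r) else r) r) []
      = (List.range lst.length).foldl (fun r i =>
          if runp (lst.drop i) > r.length then (lst.drop i).take (runp (lst.drop i)) else r) [] := by
        congr 1; funext r i; exact step2 r i
    _ = afold [] lst := fold_drop lst []

theorem runp_append_pal {c : List Int} (h : c.all pal = true) (t : List Int) :
    runp (c ++ t) = c.length + runp t := by
  induction c with
  | nil => simp
  | cons b c' ih =>
    have h' := h
    simp only [List.all_cons, Bool.and_eq_true] at h'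
    simp only [List.cons_append, runp, h'.1, if_true, ih h'.2, List.length_cons]
    omega

theorem maxr_append_break {c : List Int} (h : c.all pal = true) {a : Int} (ha : pal a = false)
    (t : List Int) : maxr (c ++ a :: t) = max c.length (maxr (a :: t)) := by
  induction c with
  | nil => simp
  | cons b c' ih =>
    have h' := h
    simp only [List.all_cons, Bool.and_eq_true] at h'
    have hr : runp (b :: (c' ++ a :: t)) = c'.length + 1 := by
      simp [runp, h'.1, ha, runp_append_pal h'.2]
    rw [List.cons_append,
      show maxr (b :: (c' ++ a :: t)) = max (runp (b :: (c' ++ a :: t))) (maxr (c' ++ a :: t))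
        from rfl,
      hr, ih h'.2, List.length_cons]
    omega

theorem fmr_append_break {c : List Int} (h : c.all pal = true) {a : Int} (ha : pal a = false)
    (t : List Int) : fmr (c ++ a :: t) = if maxr (a :: t) ≤ c.length then c else fmr (a :: t) := by
  induction c with
  | nil =>
    simp only [List.nil_append, List.length_nil]
    split_ifs with h0
    · exact fmr_nil_of_maxr_zero (Nat.le_zero.mp h0)
    · rfl
  | cons b c' ih =>
    have h' := h
    simp only [List.all_cons, Bool.and_eq_true] at h'
    have hrun : runp (b :: (c' ++ a :: t)) = c'.length + 1 := by
      simp [runp, h'.1, ha, runp_append_pal h'.2]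
    simp only [List.cons_append, fmr, hrun, maxr_append_break h'.2 ha,
      ih h'.2, List.length_cons]
    have htk : (b :: (c' ++ a :: t)).take (c'.length + 1) = b :: c' := by
      simp only [List.take_succ_cons, List.take_left]
    rw [htk]
    split_ifs <;> first | rfl | omega

theorem bfold_eq (l : List Int) : ∀ best cur, cur.all pal = true → cur.length ≤ best.length →
    (l.foldl bstep (best, cur)).1 =
      if maxr (cur ++ l) > best.length then fmr (cur ++ l) else best := by
  induction l with
  | nil =>
    intro best cur hc hlen
    simp only [List.foldl_nil, List.append_nil, maxr_all hc, fmr_all hc]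
    rw [if_neg (by omega)]
  | cons a t ih =>
    intro best cur hc hlen
    simp only [List.foldl_cons, bstep]
    by_cases hp : pal a = true
    · simp only [hp, if_true]
      have hc' : (cur ++ [a]).all pal = true := by
        simp only [List.all_append, Bool.and_eq_true]
        exact ⟨hc, by simp [hp]⟩
      have hassoc : cur ++ a :: t = (cur ++ [a]) ++ t := by simp
      by_cases hlt : (cur ++ [a]).length > best.length
      · rw [if_pos hlt, ih _ _ hc' (le_refl _), hassoc]
        have hrun : runp ((cur ++ [a]) ++ t) = (cur ++ [a]).length + runp t :=
          runp_append_pal hc' t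
        have hM := maxr_ge_runp ((cur ++ [a]) ++ t)
        rw [if_pos (show maxr ((cur ++ [a]) ++ t) > best.length from by omega)]
        by_cases h2 : maxr ((cur ++ [a]) ++ t) > (cur ++ [a]).length
        · rw [if_pos h2]
        · rw [if_neg h2]
          have hre : runp ((cur ++ [a]) ++ t) = maxr ((cur ++ [a]) ++ t) := by omega
          rw [fmr_eq_take_of_runp_eq_maxr hre, hrun,
            show (cur ++ [a]).length + runp t = (cur ++ [a]).length from by omega,
            List.take_left]
      · rw [if_neg hlt, ih _ _ hc' (by omega), hassoc]
    · have hp' : pal a = false := by simpa using hp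
      simp only [hp', Bool.false_eq_true, if_false]
      rw [ih best [] (by simp) (by simp)]
      simp only [List.nil_append]
      have hma : maxr (a :: t) = maxr t := by simp [maxr, runp, hp']
      have hfa : fmr (a :: t) = fmr t := by
        simp only [fmr, runp, hp', Bool.false_eq_true, if_false, ge_iff_le,
          Nat.le_zero, List.take_zero]
        split_ifs with h0
        · exact (fmr_nil_of_maxr_zero h0).symm
        · rfl
      rw [maxr_append_break hc hp' t, fmr_append_break hc hp' t, hma, hfa]
      split_ifs <;> first | rfl | omega

-- ===== VERDICT (by name: the statement is the Claim_ definition above) =====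
theorem get_longest_all_palindromes_spec : Claim_equal_get_longest_all_palindromes := by
  intro lst _
  unfold Spec_get_longest_all_palindromes
  rw [portA_eq_afold, afold_eq]
  unfold get_longest_all_palindromes_alt
  rw [bfold_eq lst [] [] (by simp) (by simp)]
  simp only [List.nil_append, List.length_nil]
  rfl
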